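-- pv_equiv track=rewrite | github.com/jxmai/Online-List-Update | algs/paid_pfc.py | serve_accesses
-- ===== SOURCE A (Python) =====
-- def serve_accesses(sequence, working_list):
--     total_cost = 0
--     cost_counters = [0] * len(working_list)
--     for s in sequence:
--         index = working_list.index(s)
--         total_cost += index + 1
--         cost_counters[index] += index+1
--
--         while index>0 and cost_counters[index] > cost_counters[index-1]:
--             working_list[index], working_list[index-1] = working_list[index-1], working_list[index]
--             cost_counters[index], cost_counters[index-1] = cost_counters[index-1], cost_counters[index]
--             index -= 1
--             total_cost += 1
--
--     return working_list, total_cost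
-- ===== SOURCE B (Python) =====
-- def serve_accesses(sequence, working_list):
--     total_cost = 0
--     counters = [0] * len(working_list)
--     for s in sequence:
--         index = working_list.index(s)
--         total_cost += index + 1
--         c = counters[index] + index + 1
--         # target = first position whose predecessor's counter is >= c
--         target = index
--         while target > 0 and counters[target - 1] < c:
--             target -= 1
--         if target == index:
--             counters[index] = c
--         else:
--             del working_list[index]
--             del counters[index]
--             working_list.insert(target, s)
--             counters.insert(target, c)
--             total_cost += index - target
--     return working_list, total_cost
-- ===== Notes on version B (the rewrite author's own statement) =====
-- stated objective: alternative
-- what changed: Replaces the adjacent-swap while-loop (swapping list and counter entries one step at a time) by a pure leftward scan over the untouched counters that computes the final target position, then a single delete-and-insert splice (skipped when the element does not move), charging all paid exchanges (index - target) at once.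
import Mathlib
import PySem

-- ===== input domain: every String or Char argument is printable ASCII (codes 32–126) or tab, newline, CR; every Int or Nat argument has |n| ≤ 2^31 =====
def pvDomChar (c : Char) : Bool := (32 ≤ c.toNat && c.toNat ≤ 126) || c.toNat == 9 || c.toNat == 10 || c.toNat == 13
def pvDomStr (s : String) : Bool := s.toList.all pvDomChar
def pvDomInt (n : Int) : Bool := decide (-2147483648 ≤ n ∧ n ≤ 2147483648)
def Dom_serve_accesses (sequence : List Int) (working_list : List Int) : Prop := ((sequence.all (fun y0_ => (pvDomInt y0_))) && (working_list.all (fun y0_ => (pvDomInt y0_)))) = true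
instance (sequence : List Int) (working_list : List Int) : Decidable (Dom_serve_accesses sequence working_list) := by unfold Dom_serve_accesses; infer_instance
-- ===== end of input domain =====

-- B replaces A's adjacent-swap while-loop by a scan that finds the target position
-- and one splice; equivalence is about the RETURN value (both Pythons mutate working_list).

-- ===== PORT A =====
-- the while-loop of A: bubble the element at position j+1 leftwards by adjacent swaps
def pvLoopA : Nat → List Int → List Int → Int → List Int × List Int × Int
  | 0, wl, cc, tc => (wl, cc, tc)
  | j+1, wl, cc, tc =>
    if cc.getD j 0 < cc.getD (j+1) 0 then
      pvLoopA j ((wl.set (j+1) (wl.getD j 0)).set j (wl.getD (j+1) 0))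
               ((cc.set (j+1) (cc.getD j 0)).set j (cc.getD (j+1) 0)) (tc + 1)
    else (wl, cc, tc)

def pvStepA (st : List Int × List Int × Int) (s : Int) : List Int × List Int × Int :=
  match PySem.List.index? st.1 s with
  | none => st  -- Python raises ValueError here; excluded by Pre_
  | some i =>
      pvLoopA i st.1 (st.2.1.set i (st.2.1.getD i 0 + ((i : Int) + 1))) (st.2.2 + ((i : Int) + 1))

def serve_accesses (sequence : List Int) (working_list : List Int) : List Int × Int :=
  let r := sequence.foldl pvStepA (working_list, List.replicate working_list.length 0, 0)
  (r.1, r.2.2)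

-- ===== PORT B =====
-- scan leftward from t for the first position whose predecessor's counter is >= c
def pvTarget : Nat → List Int → Int → Nat
  | 0, _, _ => 0
  | j+1, cc, c => if cc.getD j 0 < c then pvTarget j cc c else j + 1

def pvStepB (st : List Int × List Int × Int) (s : Int) : List Int × List Int × Int :=
  match PySem.List.index? st.1 s with
  | none => st  -- Python raises ValueError here; excluded by Pre_
  | some i =>
      let c := st.2.1.getD i 0 + ((i : Int) + 1)
      let t := pvTarget i st.2.1 c
      if t = i then
        (st.1, st.2.1.set i c, st.2.2 + ((i : Int) + 1))
      else
        ((st.1.eraseIdx i).insertIdx t s,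
         (st.2.1.eraseIdx i).insertIdx t c,
         st.2.2 + ((i : Int) + 1) + ((i : Int) - (t : Int)))

def serve_accesses_alt (sequence : List Int) (working_list : List Int) : List Int × Int :=
  let r := sequence.foldl pvStepB (working_list, List.replicate working_list.length 0, 0)
  (r.1, r.2.2)

-- ===== PRECONDITION & SPEC =====
-- Pre_ excludes exactly the inputs on which A raises ValueError: an accessed
-- element not present in working_list (membership is invariant under A's swaps).
def Pre_serve_accesses (sequence : List Int) (working_list : List Int) : Prop :=
  ∀ s ∈ sequence, s ∈ working_list
instance (sequence : List Int) (working_list : List Int) : Decidable (Pre_serve_accesses sequence working_list) := by unfold Pre_serve_accesses; infer_instance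

def pvWitness_serve_accesses : List Int × List Int := ([1, 3, 3, 2], [1, 2, 3])

def Spec_serve_accesses (sequence : List Int) (working_list : List Int) (out : List Int × Int) : Prop := out = serve_accesses_alt sequence working_list
instance (sequence : List Int) (working_list : List Int) (out : List Int × Int) : Decidable (Spec_serve_accesses sequence working_list out) := by unfold Spec_serve_accesses; infer_instance

-- ===== CLAIM (what is proved, stated in full; the proofs are below) =====
def Claim_equal_serve_accesses : Prop := ∀ (sequence : List Int) (working_list : List Int), Dom_serve_accesses sequence working_list → Pre_serve_accesses sequence working_list → Spec_serve_accesses sequence working_list (serve_accesses sequence working_list)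

-- ===== LEMMAS AND PROOFS =====

lemma getD_eq (l : List Int) (k : Nat) : l.getD k 0 = l[k]?.getD 0 :=
  List.getD_eq_getElem?_getD

lemma pvTarget_le (t : Nat) (cc : List Int) (c : Int) : pvTarget t cc c ≤ t := by
  induction t with
  | zero => simp [pvTarget]
  | succ k ih => simp only [pvTarget]; split <;> omega

-- pvTarget only inspects counters below its first argument
lemma pvTarget_congr (t : Nat) (cc cc' : List Int) (c : Int)
    (h : ∀ k, k < t → cc.getD k 0 = cc'.getD k 0) :
    pvTarget t cc c = pvTarget t cc' c := by
  induction t with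
  | zero => rfl
  | succ j ih =>
    simp only [pvTarget, h j (Nat.lt_succ_self j)]
    split
    · exact ih (fun k hk => h k (Nat.lt_succ_of_lt hk))
    · rfl

lemma eraseIdx_set_same (l : List Int) (i : Nat) (v : Int) :
    (l.set i v).eraseIdx i = l.eraseIdx i := by
  induction l generalizing i with
  | nil => simp
  | cons a l ih =>
    cases i with
    | zero => simp
    | succ j => simp [List.set, List.eraseIdx, ih]

-- swapping j and j+1 then erasing j erases position j+1 of the original
lemma swap_eraseIdx (l : List Int) (j : Nat) (h : j + 1 < l.length) :
    ((l.set (j+1) (l.getD j 0)).set j (l.getD (j+1) 0)).eraseIdx j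
      = l.eraseIdx (j+1) := by
  induction l generalizing j with
  | nil => simp at h
  | cons a l ih =>
    cases j with
    | zero =>
      cases l with
      | nil => simp at h
      | cons b l => simp [List.set, List.eraseIdx, List.getD]
    | succ k =>
      simp only [List.length_cons] at h
      have := ih k (by omega)
      simp [List.set, List.eraseIdx, List.getD] at this ⊢
      exact this

lemma insertIdx_eraseIdx_set (l : List Int) (i : Nat) (v : Int) (h : i < l.length) :
    (l.eraseIdx i).insertIdx i v = l.set i v := by
  induction l generalizing i with
  | nil => simp at h
  | cons a l ih =>
    cases i with
    | zero => simp
    | succ j =>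
      simp only [List.length_cons] at h
      have := ih j (by omega)
      simp only [List.eraseIdx, List.insertIdx, List.set] at this ⊢
      simp [this]

lemma insertIdx_eraseIdx_getD (l : List Int) (i : Nat) (h : i < l.length) :
    (l.eraseIdx i).insertIdx i (l.getD i 0) = l := by
  rw [insertIdx_eraseIdx_set l i _ h, getD_eq, List.getElem?_eq_getElem h]
  simp

-- the main loop lemma: A's bubble loop computes B's splice
lemma pvLoopA_eq (i : Nat) (wl cc : List Int) (tc : Int)
    (hi : i < wl.length) (hl : cc.length = wl.length) :
    pvLoopA i wl cc tc =
      ((wl.eraseIdx i).insertIdx (pvTarget i cc (cc.getD i 0)) (wl.getD i 0),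
       (cc.eraseIdx i).insertIdx (pvTarget i cc (cc.getD i 0)) (cc.getD i 0),
       tc + ((i : Int) - (pvTarget i cc (cc.getD i 0) : Int))) := by
  induction i generalizing wl cc tc with
  | zero =>
    show (wl, cc, tc) = _
    rw [show pvTarget 0 cc (cc.getD 0 0) = 0 from rfl,
      insertIdx_eraseIdx_getD wl 0 hi, insertIdx_eraseIdx_getD cc 0 (by omega)]
    simp
  | succ j ih =>
    by_cases hc : cc.getD j 0 < cc.getD (j+1) 0
    · have hcc : j + 1 < cc.length := by omega
      set wl' := (wl.set (j+1) (wl.getD j 0)).set j (wl.getD (j+1) 0) with hwl'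
      set cc' := (cc.set (j+1) (cc.getD j 0)).set j (cc.getD (j+1) 0) with hcc'
      have hlen' : cc'.length = wl'.length := by simp [hwl', hcc', hl]
      have hj' : j < wl'.length := by simp [hwl']; omega
      have hgw : wl'.getD j 0 = wl.getD (j+1) 0 := by
        rw [hwl', getD_eq, List.getElem?_set_self (by simp; omega), getD_eq]
        simp
      have hgc : cc'.getD j 0 = cc.getD (j+1) 0 := by
        rw [hcc', getD_eq, List.getElem?_set_self (by simp; omega), getD_eq]
        simp
      have htgt : pvTarget j cc' (cc.getD (j+1) 0) = pvTarget j cc (cc.getD (j+1) 0) := by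
        apply pvTarget_congr
        intro k hk
        rw [hcc', getD_eq, getD_eq,
          List.getElem?_set_ne (by omega), List.getElem?_set_ne (by omega)]
        exact (getD_eq _ _).symm
      have hew : wl'.eraseIdx j = wl.eraseIdx (j+1) := swap_eraseIdx wl j hi
      have hec : cc'.eraseIdx j = cc.eraseIdx (j+1) := swap_eraseIdx cc j hcc
      have hT : pvTarget (j+1) cc (cc.getD (j+1) 0) = pvTarget j cc (cc.getD (j+1) 0) := by
        rw [pvTarget, if_pos hc]
      rw [show pvLoopA (j+1) wl cc tc = pvLoopA j wl' cc' (tc + 1) by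
            rw [pvLoopA, if_pos hc]]
      rw [ih wl' cc' (tc + 1) hj' hlen', hgw, hgc, htgt, hew, hec, hT]
      have hle : pvTarget j cc (cc.getD (j+1) 0) ≤ j := pvTarget_le j cc _
      refine Prod.ext rfl (Prod.ext rfl ?_)
      simp only
      omega
    · have hT : pvTarget (j+1) cc (cc.getD (j+1) 0) = j + 1 := by
        rw [pvTarget, if_neg hc]
      rw [show pvLoopA (j+1) wl cc tc = (wl, cc, tc) by rw [pvLoopA, if_neg hc]]
      rw [hT, insertIdx_eraseIdx_getD wl (j+1) hi,
        insertIdx_eraseIdx_getD cc (j+1) (by omega)]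
      refine Prod.ext rfl (Prod.ext rfl ?_)
      simp

lemma step_eq (st : List Int × List Int × Int) (s : Int)
    (hl : st.2.1.length = st.1.length) : pvStepA st s = pvStepB st s := by
  unfold pvStepA pvStepB
  cases hidx : PySem.List.index? st.1 s with
  | none => rfl
  | some i =>
    obtain ⟨hi, hv, -⟩ := PySem.List.getElem_of_index?_eq_some hidx
    simp only
    have hil : i < st.2.1.length := by omega
    rw [pvLoopA_eq i st.1 (st.2.1.set i (st.2.1.getD i 0 + ((i : Int) + 1))) _ hi
      (by simp [hl])]
    have hg : (st.2.1.set i (st.2.1.getD i 0 + ((i : Int) + 1))).getD i 0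
        = st.2.1.getD i 0 + ((i : Int) + 1) := by
      rw [getD_eq, List.getElem?_set_self hil]
      simp
    have htgt : pvTarget i (st.2.1.set i (st.2.1.getD i 0 + ((i : Int) + 1)))
          (st.2.1.getD i 0 + ((i : Int) + 1))
        = pvTarget i st.2.1 (st.2.1.getD i 0 + ((i : Int) + 1)) := by
      apply pvTarget_congr
      intro k hk
      rw [getD_eq, List.getElem?_set_ne (by omega)]
      exact (getD_eq _ _).symm
    have hs : st.1.getD i 0 = s := by
      rw [getD_eq, List.getElem?_eq_getElem hi]
      simpa using hv
    rw [hg, htgt, eraseIdx_set_same, hs]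
    by_cases ht : pvTarget i st.2.1 (st.2.1.getD i 0 + ((i : Int) + 1)) = i
    · rw [if_pos ht, ht, insertIdx_eraseIdx_set st.2.1 i _ hil, ← hs,
        insertIdx_eraseIdx_getD st.1 i hi]
      simp
    · rw [if_neg ht]

lemma stepB_len (st : List Int × List Int × Int) (s : Int)
    (hl : st.2.1.length = st.1.length) :
    (pvStepB st s).2.1.length = (pvStepB st s).1.length := by
  unfold pvStepB
  cases hidx : PySem.List.index? st.1 s with
  | none => exact hl
  | some i =>
    obtain ⟨hi, -, -⟩ := PySem.List.getElem_of_index?_eq_some hidx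
    simp only
    split
    · simp [hl]
    · simp [List.length_insertIdx, List.length_eraseIdx, hi, hl]

lemma fold_eq (seq : List Int) (st : List Int × List Int × Int)
    (hl : st.2.1.length = st.1.length) :
    seq.foldl pvStepA st = seq.foldl pvStepB st := by
  induction seq generalizing st with
  | nil => rfl
  | cons s seq ih =>
    simp only [List.foldl_cons, step_eq st s hl]
    exact ih (pvStepB st s) (stepB_len st s hl)

-- ===== VERDICT (by name: the statement is the Claim_ definition above) =====
theorem serve_accesses_spec : Claim_equal_serve_accesses := by
  intro seq wl _ _
  unfold Spec_serve_accesses serve_accesses serve_accesses_alt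
  rw [fold_eq seq _ (by simp)]
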